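-- pv_equiv track=rewrite | github.com/eldux123/Parser | grammar_utils.py | compute_terminals
-- ===== SOURCE A (Python) =====
-- def compute_terminals(productions, non_terminals):
--     terminals = set()
--     for rhs_list in productions.values():
--         for rhs in rhs_list:
--             for symbol in rhs:
--                 if symbol != 'e' and symbol not in non_terminals:
--                     if symbol == 'e':
--                         raise ValueError("Error: 'e' is not allowed as a terminal symbol")
--                     terminals.add(symbol)
--     return terminals
-- ===== SOURCE B (Python) =====
-- def compute_terminals(productions, non_terminals):
--     excluded = set(non_terminals) | {'e'}
--     rhs_lists = list(productions.values())
--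
--     def collect(lo, hi):
--         # terminals contributed by rhs_lists[lo:hi], by divide and conquer
--         if hi - lo == 0:
--             return set()
--         if hi - lo == 1:
--             return {symbol for rhs in rhs_lists[lo] for symbol in rhs} - excluded
--         mid = (lo + hi) // 2
--         return collect(lo, mid) | collect(mid, hi)
--
--     return collect(0, len(rhs_lists))
-- ===== Notes on version B (the rewrite author's own statement) =====
-- stated objective: alternative
-- what changed: Replaces A's single triple-nested loop that tests and inserts each symbol by a divide-and-conquer recursion: the production list is split in halves, each single production's symbols are collected as a set comprehension and the precomputed excluded set (non_terminals plus 'e') is subtracted, and half-results are merged by set union; A's inner duplicated 'e' raise is unreachable and dropped.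
import Mathlib
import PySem

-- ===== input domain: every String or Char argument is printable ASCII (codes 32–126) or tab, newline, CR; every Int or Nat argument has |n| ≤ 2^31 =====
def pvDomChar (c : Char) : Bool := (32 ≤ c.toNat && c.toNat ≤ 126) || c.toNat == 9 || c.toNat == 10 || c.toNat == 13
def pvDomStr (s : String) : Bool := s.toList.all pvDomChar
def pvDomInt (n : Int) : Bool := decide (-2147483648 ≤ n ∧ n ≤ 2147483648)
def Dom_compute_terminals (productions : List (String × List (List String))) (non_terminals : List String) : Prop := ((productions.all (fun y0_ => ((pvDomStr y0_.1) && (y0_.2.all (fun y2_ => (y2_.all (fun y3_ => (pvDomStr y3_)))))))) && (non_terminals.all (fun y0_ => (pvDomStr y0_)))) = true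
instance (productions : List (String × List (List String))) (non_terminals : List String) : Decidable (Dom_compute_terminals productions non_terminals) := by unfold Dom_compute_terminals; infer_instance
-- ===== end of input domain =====

-- B replaces A's single triple-nested filtering loop by a divide-and-conquer recursion:
-- it splits the production list in halves, computes each half's terminal set (per-production
-- set comprehension minus a precomputed excluded set) and unions the results (objective: alternative).
-- ===== PORT A =====
def compute_terminals (productions : List (String × List (List String))) (non_terminals : List String) : List String :=
  -- terminals = set(); for rhs_list in productions.values(): for rhs in rhs_list: for symbol in rhs: ...
  productions.foldl (fun terminals kv =>
    kv.2.foldl (fun terminals rhs =>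
      rhs.foldl (fun terminals symbol =>
        if symbol ≠ "e" ∧ symbol ∉ non_terminals then
          -- the nested `if symbol == 'e': raise` is unreachable here (symbol ≠ "e" holds)
          PySem.Set.add terminals symbol
        else terminals) terminals) terminals) PySem.Set.empty

-- ===== PORT B =====
-- def collect(lo, hi): divide-and-conquer over rhs_lists[lo:hi]
def collectTerm (rhs_lists : List (List (List String))) (excluded : PySem.Set String) (lo hi : Nat) : PySem.Set String :=
  if hi - lo = 0 then
    PySem.Set.empty
  else if hi - lo = 1 then
    -- {symbol for rhs in rhs_lists[lo] for symbol in rhs} - excluded   (lo is always in range)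
    PySem.Set.diff (PySem.Set.ofList ((rhs_lists.getD lo []).flatMap id)) excluded
  else
    let mid := (lo + hi) / 2
    PySem.Set.union (collectTerm rhs_lists excluded lo mid) (collectTerm rhs_lists excluded mid hi)
  termination_by hi - lo
  decreasing_by all_goals omega

def compute_terminals_alt (productions : List (String × List (List String))) (non_terminals : List String) : List String :=
  -- excluded = set(non_terminals) | {'e'}
  let excluded : PySem.Set String := PySem.Set.union (PySem.Set.ofList non_terminals) ["e"]
  -- rhs_lists = list(productions.values())
  let rhs_lists := productions.map (fun kv => kv.2)
  collectTerm rhs_lists excluded 0 rhs_lists.length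

-- ===== PRECONDITION & SPEC =====
def Spec_compute_terminals (productions : List (String × List (List String))) (non_terminals : List String) (out : List String) : Prop := out = compute_terminals_alt productions non_terminals
instance (productions : List (String × List (List String))) (non_terminals : List String) (out : List String) : Decidable (Spec_compute_terminals productions non_terminals out) := by unfold Spec_compute_terminals; infer_instance

-- ===== CLAIM (what is proved, stated in full; the proofs are below) =====
def Claim_equal_compute_terminals : Prop := ∀ (productions : List (String × List (List String))) (non_terminals : List String), Dom_compute_terminals productions non_terminals → Spec_compute_terminals productions non_terminals (compute_terminals productions non_terminals)

-- ===== LEMMAS AND PROOFS =====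
-- set(xs.filter p) = (set(xs)).filter p : dedup-then-filter commutes with filter-then-dedup
theorem ofList_filter (p : String → Bool) (xs : List String) :
    PySem.Set.ofList (xs.filter p) = (PySem.Set.ofList xs).filter p := by
  induction xs with
  | nil => rfl
  | cons x xs ih =>
    rw [PySem.Set.ofList_cons]
    show PySem.Set.ofList (List.filter p (x :: xs)) =
      List.filter p (x :: List.filter (fun y => !(y == x)) (PySem.Set.ofList xs))
    by_cases hx : p x = true
    · simp only [List.filter_cons, hx, if_pos]
      rw [PySem.Set.ofList_cons, ih]
      show x :: List.filter (fun y => !(y == x)) (List.filter p (PySem.Set.ofList xs)) = _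
      rw [List.filter_filter, List.filter_filter]
      congr 1
      apply List.filter_congr
      intro a _
      rw [Bool.and_comm]
    · rw [List.filter_cons, if_neg hx, ih, List.filter_cons, if_neg hx, List.filter_filter]
      apply Eq.symm
      apply List.filter_congr
      intro a _
      by_cases ha : p a = true
      · have hax : (a == x) = false := by
          cases h : a == x
          · rfl
          · exact absurd (eq_of_beq h ▸ ha) hx
        simp [ha, hax]
      · simp [Bool.eq_false_iff.mpr ha]

-- s.update(ys) ignores duplicates in ys: update s (ofList ys) = update s ys
theorem update_ofList (s : PySem.Set String) (ys : List String) :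
    PySem.Set.update s (PySem.Set.ofList ys) = PySem.Set.update s ys := by
  rw [PySem.Set.update_eq_append_filter, PySem.Set.update_eq_append_filter,
    PySem.Set.ofList_ofList]

-- set(xs) | set(ys) = set(xs ++ ys)
theorem union_ofList_ofList (xs ys : List String) :
    PySem.Set.union (PySem.Set.ofList xs) (PySem.Set.ofList ys)
      = PySem.Set.ofList (xs ++ ys) := by
  rw [PySem.Set.ofList_append]
  exact update_ofList _ _

-- the divide-and-conquer recursion computes set(filter q (flatten (flatten rhs_lists[lo:hi])))
theorem collectTerm_eq (rl : List (List (List String))) (ex : PySem.Set String)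
    (lo hi : Nat) (h1 : lo ≤ hi) (h2 : hi ≤ rl.length) :
    collectTerm rl ex lo hi
      = PySem.Set.ofList
          (List.filter (fun x => !(PySem.Set.contains ex x))
            (((rl.drop lo).take (hi - lo)).flatten.flatten)) := by
  generalize hfuel : hi - lo = n
  induction n using Nat.strong_induction_on generalizing lo hi with
  | _ n ih =>
    unfold collectTerm
    rcases Nat.lt_or_ge n 2 with hlt | hge
    · interval_cases n
      · simp [hfuel]
      · rw [if_neg (by omega), if_pos hfuel]
        have hlo : lo < rl.length := by omega
        have : rl.getD lo [] = rl[lo] := List.getD_eq_getElem rl [] hlo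
        rw [this]
        have htake : (rl.drop lo).take 1 = [rl[lo]] := by
          have : rl.drop lo = rl[lo] :: rl.drop (lo + 1) := List.drop_eq_getElem_cons hlo
          rw [this]; rfl
        rw [htake]
        show PySem.Set.diff (PySem.Set.ofList (rl[lo].flatMap id)) ex = _
        have hflat : rl[lo].flatMap id = ([rl[lo]] : List (List (List String))).flatten.flatten := by
          simp
        rw [hflat, ofList_filter]
        rfl
    · rw [if_neg (by omega), if_neg (by omega)]
      have hmidlo : lo < (lo + hi) / 2 := by omega
      have hmidhi : (lo + hi) / 2 < hi := by omega
      show (collectTerm rl ex lo ((lo + hi) / 2)).union (collectTerm rl ex ((lo + hi) / 2) hi) = _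
      rw [ih ((lo + hi) / 2 - lo) (by omega) lo ((lo + hi) / 2) (by omega) (by omega) rfl,
          ih (hi - (lo + hi) / 2) (by omega) ((lo + hi) / 2) hi (by omega) h2 rfl,
          union_ofList_ofList, ← List.filter_append, ← List.flatten_append,
          ← List.flatten_append]
      have hsplit : (List.take ((lo + hi) / 2 - lo) (rl.drop lo))
            ++ (List.take (hi - (lo + hi) / 2) (rl.drop ((lo + hi) / 2)))
          = List.take n (rl.drop lo) := by
        rw [show n = ((lo + hi) / 2 - lo) + (hi - (lo + hi) / 2) from by omega, List.take_add]
        congr 2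
        rw [List.drop_drop]
        congr 1
        omega
      rw [hsplit]

-- ===== VERDICT (by name: the statement is the Claim_ definition above) =====
theorem compute_terminals_spec : Claim_equal_compute_terminals := by
  intro productions non_terminals _
  unfold Spec_compute_terminals compute_terminals compute_terminals_alt
  -- flatten A's triple fold into one fold over the universe list
  rw [show PySem.Set.empty = (PySem.Set.empty : PySem.Set String) from rfl]
  rw [← List.foldl_flatMap, ← List.foldl_flatMap]
  set syms := (productions.flatMap (fun kv => kv.2)).flatMap (fun rhs => rhs) with hsyms
  -- turn A's conditional insertion into a fold of Set.add over the filtered list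
  have hstep : ∀ (s : PySem.Set String),
      syms.foldl (fun terminals symbol =>
        if symbol ≠ "e" ∧ symbol ∉ non_terminals then PySem.Set.add terminals symbol
        else terminals) s
      = (syms.filter (fun x => decide (x ≠ "e" ∧ x ∉ non_terminals))).foldl PySem.Set.add s := by
    intro s
    rw [List.foldl_filter]
    congr 1
    funext acc a
    by_cases h : a ≠ "e" ∧ a ∉ non_terminals <;> simp [h]
  rw [hstep]
  rw [show (PySem.Set.empty : PySem.Set String) = [] from rfl]
  rw [← PySem.Set.ofList_eq_foldl]
  -- B's side: evaluate the divide-and-conquer recursion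
  rw [collectTerm_eq _ _ 0 _ (Nat.zero_le _) (le_refl _)]
  simp only [List.drop_zero, Nat.sub_zero, List.take_length]
  have hflat : (productions.map (fun kv => kv.2)).flatten.flatten = syms := by
    rw [hsyms]
    simp [List.flatMap_def]
  rw [hflat]
  congr 1
  apply List.filter_congr
  intro a _
  by_cases h1 : a = "e" <;> by_cases h2 : a ∈ non_terminals <;>
    simp [h1, h2, PySem.Set.mem_union, PySem.Set.mem_ofList,
      PySem.Set.contains]
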